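-- pv_equiv track=rewrite | github.com/qkkavya/kavya-why-es | whatever the ever living fuck my co project was/C.O-main/assembler.py | r_encoding
-- ===== SOURCE A (Python) =====
-- registers_encodings = {
--     'zero': '00000', 'ra': '00001', 'sp': '00010', 'gp': '00011', 'tp': '00100',
--     't0': '00101', 't1': '00110', 't2': '00111', 's0': '01000', 's1': '01001',
--     'a0': '01010', 'a1': '01011', 'a2': '01100', 'a3': '01101', 'a4': '01110',
--     'a5': '01111', 'a6': '10000', 'a7': '10001', 's2': '10010', 's3': '10011',
--     's4': '10100', 's5': '10101', 's6': '10110', 's7': '10111', 's8': '11000',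
--     's9': '11001', 's10': '11010', 's11': '11011', 't3': '11100', 't4': '11101',
--     't5': '11110', 't6': '11111'
-- }
--
-- r_type = {
--     'add': '000', 'sub': '000', 'sll': '001', 'slt': '010',
--     'sltu':'011', 'xor': '100','srl':'101',
--     'or': '110', 'and': '111'}
--
-- def r_encoding(line,ins):
--     if ins=='sub':
--         funct7='0100000'
--     else:
--         funct7='0000000'
--     reg=(line[line.index(" ")+1::]).split(',')
--     s=''
--     for i in reg:
--         if i not in registers_encodings.keys():
--             return 'error'
--     for i in reg[:0:-1]:
--         s+=registers_encodings[i]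
--     return funct7+s+r_type[ins]+registers_encodings[reg[0]]+"0110011"
-- ===== SOURCE B (Python) =====
-- registers_encodings = {
--     'zero': '00000', 'ra': '00001', 'sp': '00010', 'gp': '00011', 'tp': '00100',
--     't0': '00101', 't1': '00110', 't2': '00111', 's0': '01000', 's1': '01001',
--     'a0': '01010', 'a1': '01011', 'a2': '01100', 'a3': '01101', 'a4': '01110',
--     'a5': '01111', 'a6': '10000', 'a7': '10001', 's2': '10010', 's3': '10011',
--     's4': '10100', 's5': '10101', 's6': '10110', 's7': '10111', 's8': '11000',
--     's9': '11001', 's10': '11010', 's11': '11011', 't3': '11100', 't4': '11101',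
--     't5': '11110', 't6': '11111'
-- }
--
-- r_type = {
--     'add': '000', 'sub': '000', 'sll': '001', 'slt': '010',
--     'sltu':'011', 'xor': '100','srl':'101',
--     'or': '110', 'and': '111'}
--
--
-- def _enc_rev(fields):
--     # Recursively encode the operand names in FORWARD order, appending each
--     # code on the RIGHT of the recursive result, which yields the codes in
--     # reverse operand order; None propagates an unknown register name.
--     if not fields:
--         return ''
--     head = registers_encodings.get(fields[0])
--     if head is None:
--         return None
--     rest = _enc_rev(fields[1:])
--     if rest is None:
--         return None
--     return rest + head
--
--
-- def r_encoding(line, ins):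
--     funct7 = '0100000' if ins == 'sub' else '0000000'
--     reg = line[line.index(' ') + 1:].split(',')
--     rd = registers_encodings.get(reg[0])
--     body = _enc_rev(reg[1:])
--     if rd is None or body is None:
--         return 'error'
--     return funct7 + body + r_type[ins] + rd + "0110011"
-- ===== Notes on version B (the rewrite author's own statement) =====
-- stated objective: alternative
-- what changed: A runs two staged loops over the operand list (validate every name, then build the field string from the reversed slice reg[:0:-1] with +=); B has no validation loop and no reversed slice: a single structural recursion over the forward operand list appends each looked-up code on the right of the recursive result (yielding reverse order) and propagates None for an unknown register.
import Mathlib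
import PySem

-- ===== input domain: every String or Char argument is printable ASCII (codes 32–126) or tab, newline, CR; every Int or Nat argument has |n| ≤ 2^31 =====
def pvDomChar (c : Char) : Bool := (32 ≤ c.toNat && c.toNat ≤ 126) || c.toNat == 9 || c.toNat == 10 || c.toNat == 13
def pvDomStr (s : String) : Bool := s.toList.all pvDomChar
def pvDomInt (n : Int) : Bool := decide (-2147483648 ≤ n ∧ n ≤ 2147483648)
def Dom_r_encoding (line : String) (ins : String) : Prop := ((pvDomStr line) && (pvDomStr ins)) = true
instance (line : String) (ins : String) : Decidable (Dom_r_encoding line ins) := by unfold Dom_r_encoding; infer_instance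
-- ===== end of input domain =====

-- B replaces A's validate-loop + reversed-slice build-loop with a single structural recursion on
-- the forward operand list that appends each code on the right (Option propagates an unknown
-- register); same return value (alternative decomposition, no speed claim).

def rEnc : PySem.Dict String String := PySem.Dict.ofList [
  ("zero", "00000"), ("ra", "00001"), ("sp", "00010"), ("gp", "00011"), ("tp", "00100"),
  ("t0", "00101"), ("t1", "00110"), ("t2", "00111"), ("s0", "01000"), ("s1", "01001"),
  ("a0", "01010"), ("a1", "01011"), ("a2", "01100"), ("a3", "01101"), ("a4", "01110"),
  ("a5", "01111"), ("a6", "10000"), ("a7", "10001"), ("s2", "10010"), ("s3", "10011"),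
  ("s4", "10100"), ("s5", "10101"), ("s6", "10110"), ("s7", "10111"), ("s8", "11000"),
  ("s9", "11001"), ("s10", "11010"), ("s11", "11011"), ("t3", "11100"), ("t4", "11101"),
  ("t5", "11110"), ("t6", "11111")]

def rTyp : PySem.Dict String String := PySem.Dict.ofList [
  ("add", "000"), ("sub", "000"), ("sll", "001"), ("slt", "010"),
  ("sltu", "011"), ("xor", "100"), ("srl", "101"),
  ("or", "110"), ("and", "111")]

-- ===== PORT A =====
-- line.index(" ") raises ValueError when absent and r_type[ins] raises KeyError when ins is not an
-- R-type mnemonic; both are ported totally via find/getD and excluded by Pre_r_encoding.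
def r_encoding (line : String) (ins : String) : String :=
  let funct7 : String := if ins == "sub" then "0100000" else "0000000"
  let reg : List String :=
    (PySem.Str.split? (PySem.Str.slice line (some (PySem.Str.find line " " + 1)) none) ",").getD []
  -- for i in reg: if i not in registers_encodings.keys(): return 'error'
  if reg.all (fun i => rEnc.contains i) then
    -- s = ''; for i in reg[:0:-1]: s += registers_encodings[i]
    let s : String :=
      ((PySem.List.slice? reg none (some 0) (-1)).getD []).foldl
        (fun s i => s ++ rEnc.getD i "") ""
    funct7 ++ s ++ rTyp.getD ins "" ++ rEnc.getD (PySem.List.pyGetD reg 0 "") "" ++ "0110011"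
  else "error"

-- ===== PORT B =====
-- _enc_rev: structural recursion on the forward operand list, code appended on the RIGHT of the
-- recursive result; None (= Option.none) propagates an unknown register name.
def encRev : List String → Option String
  | [] => some ""
  | x :: t =>
    match rEnc.get? x with
    | none => none
    | some head =>
      match encRev t with
      | none => none
      | some rest => some (rest ++ head)

def r_encoding_alt (line : String) (ins : String) : String :=
  let funct7 : String := if ins == "sub" then "0100000" else "0000000"
  let reg : List String :=
    (PySem.Str.split? (PySem.Str.slice line (some (PySem.Str.find line " " + 1)) none) ",").getD []
  -- reg[0]: split(',') always yields a nonempty list, so the pyGetD default is unreachable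
  let rd? : Option String := rEnc.get? (PySem.List.pyGetD reg 0 "")
  let body? : Option String := encRev (PySem.List.slice reg (some 1) none)   -- reg[1:]
  match rd?, body? with
  | some rd, some body => funct7 ++ body ++ rTyp.getD ins "" ++ rd ++ "0110011"
  | _, _ => "error"

-- ===== PRECONDITION & SPEC =====
-- Pre_ excludes exactly the inputs where the Python A raises (B raises identically there): lines
-- without a space (ValueError from line.index) and inputs whose registers are all valid but whose
-- mnemonic is not an R-type key (KeyError from r_type[ins]).
def Pre_r_encoding (line : String) (ins : String) : Prop :=
  PySem.Str.isIn " " line = true ∧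
  ((((PySem.Str.split? (PySem.Str.slice line (some (PySem.Str.find line " " + 1)) none) ",").getD
      []).all (fun i => rEnc.contains i) = true) → rTyp.contains ins = true)
instance (line : String) (ins : String) : Decidable (Pre_r_encoding line ins) := by
  unfold Pre_r_encoding; infer_instance
def pvWitness_r_encoding : String × String := ("add a0,a1,a2", "add")

def Spec_r_encoding (line : String) (ins : String) (out : String) : Prop := out = r_encoding_alt line ins
instance (line : String) (ins : String) (out : String) : Decidable (Spec_r_encoding line ins out) := by
  unfold Spec_r_encoding; infer_instance

-- ===== CLAIM (what is proved, stated in full; the proofs are below) =====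
def Claim_equal_r_encoding : Prop := ∀ (line : String) (ins : String), Dom_r_encoding line ins → Pre_r_encoding line ins → Spec_r_encoding line ins (r_encoding line ins)

-- ===== LEMMAS AND PROOFS =====

-- reg[:0:-1] is the reversed tail of a nonempty list
theorem pv_slice_rev {α : Type} (x : α) (t : List α) :
    PySem.List.slice? (x :: t) none (some 0) (-1) = some t.reverse := by
  simp only [PySem.List.slice?, PySem.List.sliceIndices]
  norm_num
  rw [show (if 0 < t.length then t.length else 0) = t.length from by split_ifs <;> omega]
  apply List.ext_getElem
  · simp
  · intro i h1 h2
    simp only [List.getElem_map, List.getElem_range, List.getElem_reverse]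
    simp only [List.length_map, List.length_range] at h1
    have h3 : ((t.length : Int) + -(i : Int)).toNat = (t.length - 1 - i) + 1 := by omega
    simp only [h3, List.getElem_cons_succ]

-- when every name of t is a valid register, encRev t is exactly A's += loop over t.reverse
theorem pv_encRev_some (t : List String) (h : ∀ i ∈ t, rEnc.contains i = true) :
    encRev t = some (t.reverse.foldl (fun s i => s ++ rEnc.getD i "") "") := by
  induction t with
  | nil => rfl
  | cons x t ih =>
    have hx := h x (by simp)
    rw [PySem.Dict.contains_eq_isSome_get?] at hx
    obtain ⟨head, hh⟩ := Option.isSome_iff_exists.mp hx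
    rw [encRev, hh, ih (fun i hi => h i (by simp [hi]))]
    simp [List.foldl_append, PySem.Dict.getD_eq_get?_getD, hh]

theorem pv_encRev_none (t : List String) (h : ∃ i ∈ t, rEnc.contains i = false) :
    encRev t = none := by
  induction t with
  | nil => simp at h
  | cons x t ih =>
    obtain ⟨i, hi, hic⟩ := h
    rcases List.mem_cons.mp hi with rfl | hit
    · rw [PySem.Dict.contains_eq_isSome_get?] at hic
      simp only [Option.isSome_eq_false_iff, Option.isNone_iff_eq_none] at hic
      rw [encRev, hic]
    · rw [encRev, ih ⟨i, hit, hic⟩]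
      cases rEnc.get? x <;> rfl

-- core: for a nonempty register list the two bodies agree
theorem pv_core (f7 m : String) (x : String) (t : List String) :
    (if (x :: t).all (fun i => rEnc.contains i) then
        f7 ++ (((PySem.List.slice? (x :: t) none (some 0) (-1)).getD []).foldl
            (fun s i => s ++ rEnc.getD i "") "")
          ++ m ++ rEnc.getD (PySem.List.pyGetD (x :: t) 0 "") "" ++ "0110011"
      else "error")
    = (match rEnc.get? (PySem.List.pyGetD (x :: t) 0 ""),
        encRev (PySem.List.slice (x :: t) (some 1) none) with
      | some rd, some body => f7 ++ body ++ m ++ rd ++ "0110011"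
      | _, _ => "error") := by
  rw [pv_slice_rev, PySem.List.slice_from_one, PySem.List.pyGetD_zero_cons]
  simp only [Option.getD_some, List.tail_cons]
  by_cases h : (x :: t).all (fun i => rEnc.contains i) = true
  · have hx : rEnc.contains x = true := by
      have := (List.all_eq_true.mp h) x (by simp); simpa using this
    have ht : ∀ i ∈ t, rEnc.contains i = true := by
      intro i hi
      have := (List.all_eq_true.mp h) i (by simp [hi])
      simpa using this
    rw [PySem.Dict.contains_eq_isSome_get?] at hx
    obtain ⟨rd, hrd⟩ := Option.isSome_iff_exists.mp hx
    rw [if_pos h, pv_encRev_some t ht, hrd]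
    simp only [PySem.Dict.getD_eq_get?_getD, hrd, Option.getD_some]
  · rw [if_neg h]
    simp only [List.all_eq_true, not_forall] at h
    obtain ⟨i, hi, hic⟩ := h
    have hic' : rEnc.contains i = false := by simpa using hic
    rcases List.mem_cons.mp hi with rfl | hit
    · rw [PySem.Dict.contains_eq_isSome_get?] at hic'
      simp only [Option.isSome_eq_false_iff, Option.isNone_iff_eq_none] at hic'
      rw [hic']
    · rw [pv_encRev_none t ⟨i, hit, hic'⟩]
      cases rEnc.get? x <;> rfl

theorem pv_go_ne_nil (sep : List Char) : ∀ (fuel : Nat) (l cur : List Char) (acc : List (List Char)),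
    PySem.Chars.splitOn.go sep fuel l cur acc ≠ [] := by
  intro fuel
  induction fuel with
  | zero => intro l cur acc; simp [PySem.Chars.splitOn.go]
  | succ n ih =>
    intro l cur acc
    cases l with
    | nil => simp [PySem.Chars.splitOn.go]
    | cons c rest =>
      rw [PySem.Chars.splitOn.go]
      split_ifs <;> apply ih

theorem pv_split_ne_nil (s : String) :
    (PySem.Str.split? s ",").getD [] ≠ [] := by
  simp only [PySem.Str.split?, PySem.Chars.split?]
  rw [if_neg (by decide)]
  simp only [Option.map_some, Option.getD_some, ne_eq, List.map_eq_nil_iff]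
  exact pv_go_ne_nil _ _ _ _ _

-- ===== VERDICT (by name: the statement is the Claim_ definition above) =====
theorem r_encoding_spec : Claim_equal_r_encoding := by
  intro line ins _ _
  unfold Spec_r_encoding r_encoding r_encoding_alt
  rcases hne : (PySem.Str.split? (PySem.Str.slice line (some (PySem.Str.find line " " + 1)) none)
      ",").getD [] with _ | ⟨x, t⟩
  · exact absurd hne (pv_split_ne_nil _)
  · exact pv_core _ _ x t
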